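-- pv_equiv track=rewrite | github.com/AdamZhouSE/pythonHomework | Code/CodeRecords/2841/60637/289385.py | Iteration
-- ===== SOURCE A (Python) =====
-- def Iteration(arr,n):
--     if(len(arr)==1):
--         return arr[0]
--     else:
--         new_arr=[]
--         if(n==0):
--             for i in range(0,len(arr),2):
--                 new_arr.append(arr[i]|arr[i+1])
--         else:
--             for i in range(0,len(arr),2):
--                 new_arr.append(arr[i]^arr[i+1])
--         return Iteration(new_arr,1-n)
-- ===== SOURCE B (Python) =====
-- def Iteration(arr, n):
--     while len(arr) != 1:
--         it = iter(arr)
--         arr = [x | y if n == 0 else x ^ y for x, y in zip(it, it)]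
--         n = 1 - n
--     return arr[0]
-- ===== Notes on version B (the rewrite author's own statement) =====
-- stated objective: simpler
-- what changed: Replaced A's recursion (one call per level, building each level with an index loop over range(0,len,2)) by a single iterative while-loop that pairs consecutive elements with the zip(it,it) idiom and a list comprehension.
import Mathlib
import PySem

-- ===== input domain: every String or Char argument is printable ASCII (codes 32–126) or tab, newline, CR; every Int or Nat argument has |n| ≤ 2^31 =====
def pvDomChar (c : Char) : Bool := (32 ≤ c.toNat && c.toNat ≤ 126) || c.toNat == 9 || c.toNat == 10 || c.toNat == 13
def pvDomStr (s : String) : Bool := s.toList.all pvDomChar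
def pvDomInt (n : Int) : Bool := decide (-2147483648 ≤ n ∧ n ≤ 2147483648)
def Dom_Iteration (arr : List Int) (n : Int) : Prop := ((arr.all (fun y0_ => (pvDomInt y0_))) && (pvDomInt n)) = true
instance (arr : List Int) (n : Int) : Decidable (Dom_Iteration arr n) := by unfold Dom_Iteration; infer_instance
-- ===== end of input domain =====

-- B replaces A's per-level recursion by one iterative while-loop pairing consecutive
-- elements (zip(it,it) idiom); equal on every power-of-two-length input (where A returns).

-- ===== PORT A =====
-- helper lemmas cited by the port's decreasing_by (loop body length)
theorem pv_foldl_append {α β : Type} (f : α → β) :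
    ∀ (l : List α) (init : List β),
      l.foldl (fun acc i => acc ++ [f i]) init = init ++ l.map f
  | [], init => by simp
  | x :: xs, init => by
      simp [List.foldl_cons, pv_foldl_append f xs (init ++ [f x])]

theorem pv_pyRange2 (L : Nat) :
    PySem.List.pyRange 0 (L : Int) 2 =
      (List.range ((L + 1) / 2)).map (fun (k : Nat) => 2 * (k : Int)) := by
  rw [PySem.List.pyRange_of_pos 0 (L : Int) (by norm_num)]
  have hc : (if (0 : Int) < (L : Int) then (((L : Int) - 0 + 2 - 1) / 2).toNat else 0)
      = (L + 1) / 2 := by split <;> omega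
  rw [hc]
  exact List.map_congr_left fun k _ => by ring

-- A's arr[i] / arr[i+1] is ported as pyGetD with default 0: inside Pre_ every index
-- Python touches is in range, so the default is never taken where A returns.
def Iteration (arr : List Int) (n : Int) : Int :=
  if _h1 : arr.length = 1 then
    PySem.List.pyGetD arr 0 0
  else if _h0 : arr.length = 0 then 0
    -- on [] the Python recurses forever (RecursionError); totality guard, outside Pre_
  else
    let new_arr : List Int :=
      if n = 0 then
        (PySem.List.pyRange 0 (arr.length : Int) 2).foldl
          (fun acc i => acc ++ [PySem.Int.bor (PySem.List.pyGetD arr i 0) (PySem.List.pyGetD arr (i + 1) 0)]) []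
      else
        (PySem.List.pyRange 0 (arr.length : Int) 2).foldl
          (fun acc i => acc ++ [PySem.Int.bxor (PySem.List.pyGetD arr i 0) (PySem.List.pyGetD arr (i + 1) 0)]) []
    Iteration new_arr (1 - n)
termination_by arr.length
decreasing_by
  split <;>
    simp only [pv_foldl_append, List.nil_append, pv_pyRange2, List.length_map,
      List.length_range] <;> omega

-- ===== PORT B =====
-- zip(it, it) over a list pairs consecutive elements; ported as structural pairing (exact)
def pairsOf : List Int → List (Int × Int)
  | a :: b :: rest => (a, b) :: pairsOf rest
  | _ => []

theorem pv_pairsOf_length : ∀ xs : List Int, (pairsOf xs).length = xs.length / 2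
  | [] => by simp [pairsOf]
  | [_] => by simp [pairsOf]
  | _ :: _ :: rest => by
      simp [pairsOf, pv_pairsOf_length rest]
      omega

def Iteration_alt (arr : List Int) (n : Int) : Int :=
  if _h1 : arr.length = 1 then
    PySem.List.pyGetD arr 0 0
  else if _h0 : arr.length = 0 then 0
    -- on [] the Python while-loop never exits; totality guard, outside Pre_
  else
    Iteration_alt ((pairsOf arr).map (fun p => if n = 0 then PySem.Int.bor p.1 p.2 else PySem.Int.bxor p.1 p.2)) (1 - n)
termination_by arr.length
decreasing_by
  simp only [List.length_map, pv_pairsOf_length]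
  omega

-- ===== PRECONDITION & SPEC =====
-- Pre_ is exactly the set of inputs on which the Python A returns normally: arrays whose
-- length is a power of two (every reduction level then has even length until it reaches 1).
def Pre_Iteration (arr : List Int) (n : Int) : Prop :=
  arr.length = 2 ^ Nat.log2 arr.length
instance (arr : List Int) (n : Int) : Decidable (Pre_Iteration arr n) := by
  unfold Pre_Iteration; infer_instance

def pvWitness_Iteration : List Int × Int := ([1, 2, 3, 4], 0)

def Spec_Iteration (arr : List Int) (n : Int) (out : Int) : Prop := out = Iteration_alt arr n
instance (arr : List Int) (n : Int) (out : Int) : Decidable (Spec_Iteration arr n out) := by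
  unfold Spec_Iteration; infer_instance

-- ===== CLAIM (what is proved, stated in full; the proofs are below) =====
def Claim_equal_Iteration : Prop := ∀ (arr : List Int) (n : Int),
  Dom_Iteration arr n → Pre_Iteration arr n → Spec_Iteration arr n (Iteration arr n)

-- ===== LEMMAS AND PROOFS =====

theorem pv_getD_cons2 (a b : Int) (xs : List Int) (i : Int) (hi : 0 ≤ i) (d : Int) :
    PySem.List.pyGetD (a :: b :: xs) (i + 2) d = PySem.List.pyGetD xs i d := by
  lift i to Nat using hi
  have h : ((i : Int) + 2) = ((i + 2 : Nat) : Int) := by push_cast; ring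
  rw [h, PySem.List.pyGetD_natCast, PySem.List.pyGetD_natCast]
  rfl

theorem pv_pairs (op : Int → Int → Int) :
    ∀ (xs : List Int), xs.length % 2 = 0 →
      (List.range ((xs.length + 1) / 2)).map
          (fun (k : Nat) => op (PySem.List.pyGetD xs (2 * (k : Int)) 0)
                       (PySem.List.pyGetD xs (2 * (k : Int) + 1) 0))
        = (pairsOf xs).map (fun p => op p.1 p.2)
  | [], _ => by simp [pairsOf]
  | [_], h => by simp at h
  | a :: b :: rest, h => by
      have hm : rest.length % 2 = 0 := by simp at h; omega
      have ih := pv_pairs op rest hm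
      have hcnt : ((a :: b :: rest).length + 1) / 2 = (rest.length + 1) / 2 + 1 := by
        simp; omega
      rw [hcnt, List.range_succ_eq_map, List.map_cons, List.map_map]
      simp only [pairsOf, List.map_cons]
      congr 1
      · have e0 : PySem.List.pyGetD (a :: b :: rest) (2 * ((0 : Nat) : Int)) 0 = a := by
          have h0 : (2 * ((0 : Nat) : Int)) = ((0 : Nat) : Int) := by norm_num
          rw [h0, PySem.List.pyGetD_natCast]
          simp
        have e1 : PySem.List.pyGetD (a :: b :: rest) (2 * ((0 : Nat) : Int) + 1) 0 = b := by
          have h1 : (2 * ((0 : Nat) : Int) + 1) = ((1 : Nat) : Int) := by norm_num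
          rw [h1, PySem.List.pyGetD_natCast]
          simp
        rw [e0, e1]
      · rw [← ih]
        refine List.map_congr_left (fun k _ => ?_)
        simp only [Function.comp]
        have c1 : (2 * ((Nat.succ k : Nat) : Int)) = 2 * (k : Int) + 2 := by
          push_cast; ring
        rw [c1]
        have c2 : 2 * (k : Int) + 2 + 1 = (2 * (k : Int) + 1) + 2 := by ring
        rw [c2, pv_getD_cons2 _ _ _ _ (by positivity) _,
          pv_getD_cons2 _ _ _ _ (by positivity) _]

-- A's new level (range-fold) equals B's new level (pair-map), for even length
theorem pv_level (arr : List Int) (n : Int) (h : arr.length % 2 = 0) :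
    (if n = 0 then
        (PySem.List.pyRange 0 (arr.length : Int) 2).foldl
          (fun acc i => acc ++ [PySem.Int.bor (PySem.List.pyGetD arr i 0) (PySem.List.pyGetD arr (i + 1) 0)]) []
      else
        (PySem.List.pyRange 0 (arr.length : Int) 2).foldl
          (fun acc i => acc ++ [PySem.Int.bxor (PySem.List.pyGetD arr i 0) (PySem.List.pyGetD arr (i + 1) 0)]) [])
    = (pairsOf arr).map (fun p => if n = 0 then PySem.Int.bor p.1 p.2 else PySem.Int.bxor p.1 p.2) := by
  by_cases hn : n = 0 <;>
    simp only [hn, pv_foldl_append, List.nil_append, pv_pyRange2, List.map_map] <;>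
  · first
    | exact pv_pairs (fun x y => PySem.Int.bor x y) arr h
    | exact pv_pairs (fun x y => PySem.Int.bxor x y) arr h

theorem pv_main : ∀ (k : Nat) (arr : List Int) (n : Int),
    arr.length = 2 ^ k → Iteration arr n = Iteration_alt arr n
  | 0, arr, n, h => by
      rw [Iteration.eq_def, Iteration_alt.eq_def]
      simp [h]
  | k + 1, arr, n, h => by
      have h2 : 2 ≤ arr.length := by
        rw [h]
        calc 2 = 2 ^ 1 := rfl
        _ ≤ 2 ^ (k + 1) := Nat.pow_le_pow_right (by norm_num) (by omega)
      have heven : arr.length % 2 = 0 := by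
        rw [h]
        have : 2 ^ (k + 1) = 2 * 2 ^ k := by ring
        omega
      rw [Iteration.eq_def, Iteration_alt.eq_def]
      rw [dif_neg (by omega), dif_neg (by omega), dif_neg (by omega), dif_neg (by omega)]
      rw [pv_level arr n heven]
      have hlen : ((pairsOf arr).map
          (fun p => if n = 0 then PySem.Int.bor p.1 p.2 else PySem.Int.bxor p.1 p.2)).length = 2 ^ k := by
        simp [pv_pairsOf_length, h]
        omega
      exact pv_main k _ (1 - n) hlen

-- ===== VERDICT (by name: the statement is the Claim_ definition above) =====
theorem Iteration_spec : Claim_equal_Iteration := by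
  intro arr n _ hpre
  unfold Spec_Iteration
  exact pv_main (Nat.log2 arr.length) arr n hpre
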